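-- pv_equiv track=rewrite | github.com/josebelmiro/branch_bound | heuristicas.py | heuristica_v2
-- ===== SOURCE A (Python) =====
-- def heuristica_v2(atribuicoes, grafo, contador_vizinhos):
--     n = len(grafo)
--     soma = sum(x for x in atribuicoes if x != -1)
--
--     # Conjunto de vértices que ainda exigem adjacência positiva (condição (ii) não garantida)
--     carente = [False] * n
--     for v in range(n):
--         val = atribuicoes[v]
--         pos_vizinhos = contador_vizinhos[v][1] + contador_vizinhos[v][2]
--         if val in (1, 2):
--             if pos_vizinhos == 0:
--                 carente[v] = True
--         elif val == -1:
--             if pos_vizinhos == 0: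
--                 carente[v] = True
--         # val==0: não conta para R (tratado por outro termo se desejar)
--
--     # Conta componentes no subgrafo induzido por 'carente'
--     visitado = [False] * n
--     R = 0
--     from collections import deque
--     for v in range(n):
--         if carente[v] and not visitado[v]:
--             R += 1
--             q = deque([v])
--             visitado[v] = True
--             while q:
--                 u = q.popleft()
--                 for w in grafo[u]:
--                     if carente[w] and not visitado[w]:
--                         visitado[w] = True
--                         q.append(w)
--
--     # ceil(R/2) = (R+1)//2
--     return soma + (R + 1) // 2
-- ===== SOURCE B (Python) =====
-- def heuristica_v2(atribuicoes, grafo, contador_vizinhos):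
--     n = len(grafo)
--     soma = sum(x for x in atribuicoes if x != -1)
--
--     # Same 'carente' pass as before: vertices still requiring a positive neighbour
--     carente = [False] * n
--     for v in range(n):
--         val = atribuicoes[v]
--         pos_vizinhos = contador_vizinhos[v][1] + contador_vizinhos[v][2]
--         if val in (-1, 1, 2) and pos_vizinhos == 0:
--             carente[v] = True
--
--     # Union-find (union to the smaller root) over the carente-induced subgraph;
--     # components = number of roots among carente vertices.
--     parent = list(range(n))
--
--     def find(x):
--         while parent[x] != x:
--             x = parent[x]
--         return x
--
--     for v in range(n):
--         if carente[v]: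
--             for w in grafo[v]:
--                 if carente[w]:
--                     ra, rb = find(v), find(w)
--                     if ra != rb:
--                         if ra < rb:
--                             parent[rb] = ra
--                         else:
--                             parent[ra] = rb
--
--     R = sum(1 for v in range(n) if carente[v] and find(v) == v)
--     return soma + (R + 1) // 2
-- ===== Notes on version B (the rewrite author's own statement) =====
-- stated objective: alternative
-- what changed: The per-start BFS with a deque and a visited array is replaced by a union-find (union to the smaller root) over the carente-induced edges; the component count becomes the number of carente vertices that are their own root.
-- outside the precondition, e.g. on heuristica_v2([-1, -1, -1], [[], [0], [0]], [[0, 0, 0], [0, 0, 0], [0, 0, 0]]): A returns 2, B returns 1; on heuristica_v2([-1, -1], [[-1], [0]], [[0, 0, 0], [0, 0, 0]]): A returns 1, B returns 1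
import Mathlib
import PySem

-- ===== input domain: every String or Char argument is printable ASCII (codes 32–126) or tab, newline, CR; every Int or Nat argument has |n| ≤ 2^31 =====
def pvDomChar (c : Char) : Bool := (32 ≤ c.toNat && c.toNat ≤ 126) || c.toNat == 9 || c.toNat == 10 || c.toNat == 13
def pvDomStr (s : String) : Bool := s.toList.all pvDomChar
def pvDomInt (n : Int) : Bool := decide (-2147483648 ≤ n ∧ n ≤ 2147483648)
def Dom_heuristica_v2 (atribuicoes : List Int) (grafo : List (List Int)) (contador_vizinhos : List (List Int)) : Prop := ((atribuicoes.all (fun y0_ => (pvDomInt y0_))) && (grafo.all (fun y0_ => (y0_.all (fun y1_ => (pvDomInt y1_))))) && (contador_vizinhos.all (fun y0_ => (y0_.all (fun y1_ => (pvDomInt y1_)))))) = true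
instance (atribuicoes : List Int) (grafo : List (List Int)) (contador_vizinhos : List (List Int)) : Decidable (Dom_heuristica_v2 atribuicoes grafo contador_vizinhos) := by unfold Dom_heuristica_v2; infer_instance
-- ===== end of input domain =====

-- B replaces A's per-start deque BFS by a union-find (union to the smaller root) over the
-- carente-induced edges and counts the carente vertices that are their own root ('alternative').

-- ===== PORT A =====

-- A's carente pass: loop over range(n) setting carente[v]
def pvCarenteA (atribuicoes : List Int) (contador_vizinhos : List (List Int)) (n : Nat) : List Bool :=
  (List.range n).foldl (fun car v =>
    let val := atribuicoes.getD v 0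
    let pos := (contador_vizinhos.getD v []).getD 1 0 + (contador_vizinhos.getD v []).getD 2 0
    if val = 1 ∨ val = 2 then (if pos = 0 then car.set v true else car)
    else if val = -1 then (if pos = 0 then car.set v true else car)
    else car) (List.replicate n false)

-- A's inner BFS while-loop (deque popleft = head; appends at the tail); the fuel argument
-- n+1 is only a totality guard and is never exhausted (each enqueue marks a fresh cell)
def pvBfsA (grafo : List (List Int)) (car : List Bool) : Nat → List Nat → List Bool → List Bool
  | 0, _, vis => vis
  | _ + 1, [], vis => vis
  | fuel + 1, u :: q, vis =>
    let st := (grafo.getD u []).foldl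
      (fun (st : List Bool × List Nat) w =>
        if car.getD w.toNat false && !(st.1.getD w.toNat false)
        then (st.1.set w.toNat true, st.2 ++ [w.toNat]) else st) (vis, q)
    pvBfsA grafo car fuel st.2 st.1

def heuristica_v2 (atribuicoes : List Int) (grafo : List (List Int)) (contador_vizinhos : List (List Int)) : Int :=
  let n := grafo.length
  let soma := atribuicoes.foldl (fun s x => if x ≠ -1 then s + x else s) 0
  let car := pvCarenteA atribuicoes contador_vizinhos n
  let st := (List.range n).foldl (fun (st : List Bool × Nat) v =>
      if car.getD v false && !(st.1.getD v false)
      then (pvBfsA grafo car (n + 1) [v] (st.1.set v true), st.2 + 1)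
      else st) (List.replicate n false, 0)
  soma + PySem.Int.floordiv ((st.2 : Int) + 1) 2

-- ===== PORT B =====

-- B's carente pass (same values, single combined test)
def pvCarenteB (atribuicoes : List Int) (contador_vizinhos : List (List Int)) (n : Nat) : List Bool :=
  (List.range n).foldl (fun car v =>
    let val := atribuicoes.getD v 0
    let pos := (contador_vizinhos.getD v []).getD 1 0 + (contador_vizinhos.getD v []).getD 2 0
    if (val = -1 ∨ val = 1 ∨ val = 2) ∧ pos = 0 then car.set v true else car)
    (List.replicate n false)

-- find: chase parent pointers to the root; the fuel argument is only a totality guard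
-- (parents only ever point to smaller indices, so length+1 steps always reach the root)
def pvFind (parent : List Nat) : Nat → Nat → Nat
  | 0, x => x
  | f + 1, x => let p := parent.getD x x; if p = x then x else pvFind parent f p

-- one neighbour entry of B's union loop: if carente[w], union(v, w) to the smaller root
def pvUnionStep (car : List Bool) (p : List Nat) (v : Nat) (w : Int) : List Nat :=
  if car.getD w.toNat false then
    let ra := pvFind p (p.length + 1) v
    let rb := pvFind p (p.length + 1) w.toNat
    if ra ≠ rb then (if ra < rb then p.set rb ra else p.set ra rb) else p
  else p

def heuristica_v2_alt (atribuicoes : List Int) (grafo : List (List Int)) (contador_vizinhos : List (List Int)) : Int :=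
  let n := grafo.length
  let soma := atribuicoes.foldl (fun s x => if x ≠ -1 then s + x else s) 0
  let car := pvCarenteB atribuicoes contador_vizinhos n
  let parent := (List.range n).foldl (fun p v =>
      if car.getD v false then (grafo.getD v []).foldl (fun p w => pvUnionStep car p v w) p else p)
    (List.range n)
  let R := (List.range n).foldl (fun (c : Nat) v =>
      if car.getD v false && (pvFind parent (parent.length + 1) v == v) then c + 1 else c) 0
  soma + PySem.Int.floordiv ((R : Int) + 1) 2

-- ===== PRECONDITION & SPEC =====

-- the carente condition, read directly off the inputs
def pvCarCond (atribuicoes : List Int) (contador_vizinhos : List (List Int)) (v : Nat) : Bool :=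
  (atribuicoes.getD v 0 == 1 || atribuicoes.getD v 0 == 2 || atribuicoes.getD v 0 == -1) &&
  ((contador_vizinhos.getD v []).getD 1 0 + (contador_vizinhos.getD v []).getD 2 0 == 0)

-- Pre_ restricts grafo to a valid undirected adjacency list on the carente vertices (entries of
-- carente rows in [0,n), carente-carente edges symmetric): out-of-range entries make A raise
-- IndexError, negative entries rely on Python's accidental negative-index wraparound, and on an
-- asymmetric list A's component count depends on scan order (an artefact of running a directed
-- BFS for an undirected heuristic); the length conjuncts exclude exactly the inputs where A
-- raises IndexError reading atribuicoes[v] or contador_vizinhos[v][1..2].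
def Pre_heuristica_v2 (atribuicoes : List Int) (grafo : List (List Int)) (contador_vizinhos : List (List Int)) : Prop :=
  grafo.length ≤ atribuicoes.length ∧ grafo.length ≤ contador_vizinhos.length ∧
  (∀ v < grafo.length, 3 ≤ (contador_vizinhos.getD v []).length) ∧
  (∀ v < grafo.length, pvCarCond atribuicoes contador_vizinhos v = true →
     ∀ w ∈ grafo.getD v [], 0 ≤ w ∧ w.toNat < grafo.length ∧
       (pvCarCond atribuicoes contador_vizinhos w.toNat = true → (v : Int) ∈ grafo.getD w.toNat []))

instance (atribuicoes : List Int) (grafo : List (List Int)) (contador_vizinhos : List (List Int)) : Decidable (Pre_heuristica_v2 atribuicoes grafo contador_vizinhos) := by unfold Pre_heuristica_v2; infer_instance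

def pvWitness_heuristica_v2 : List Int × List (List Int) × List (List Int) :=
  ([-1, -1], [[1], [0]], [[0, 0, 0], [0, 0, 0]])

def Spec_heuristica_v2 (atribuicoes : List Int) (grafo : List (List Int)) (contador_vizinhos : List (List Int)) (out : Int) : Prop := out = heuristica_v2_alt atribuicoes grafo contador_vizinhos
instance (atribuicoes : List Int) (grafo : List (List Int)) (contador_vizinhos : List (List Int)) (out : Int) : Decidable (Spec_heuristica_v2 atribuicoes grafo contador_vizinhos out) := by unfold Spec_heuristica_v2; infer_instance

-- ===== CLAIM (what is proved, stated in full; the proofs are below) =====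
def Claim_equal_heuristica_v2 : Prop := ∀ (atribuicoes : List Int) (grafo : List (List Int)) (contador_vizinhos : List (List Int)), Dom_heuristica_v2 atribuicoes grafo contador_vizinhos → Pre_heuristica_v2 atribuicoes grafo contador_vizinhos → Spec_heuristica_v2 atribuicoes grafo contador_vizinhos (heuristica_v2 atribuicoes grafo contador_vizinhos)

-- ===== LEMMAS AND PROOFS =====

-- generic helpers
theorem pvGetD_true_lt (l : List Bool) (i : Nat) (h : l.getD i false = true) : i < l.length := by
  by_contra hc
  rw [List.getD_eq_getElem?_getD, List.getElem?_eq_none (by omega)] at h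
  simp at h

theorem pvCount_false_set (l : List Bool) (i : Nat) (h : i < l.length)
    (hf : l.getD i false = false) : (l.set i true).count false + 1 = l.count false := by
  induction l generalizing i with
  | nil => simp at h
  | cons a t ih =>
    cases i with
    | zero =>
      simp [List.getD] at hf
      subst hf
      simp [List.count_cons]
    | succ j =>
      simp at h
      simp [List.getD] at hf
      have := ih j h (by simpa [List.getD] using hf)
      simp [List.count_cons, List.set]
      cases a <;> simp <;> omega

noncomputable def pvCnt (P : Nat → Prop) (k : Nat) : Nat :=
  (List.range k).countP (fun v => @decide (P v) (Classical.propDecidable _))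

theorem pvCnt_succ_of (P : Nat → Prop) (k : Nat) (h : P k) :
    pvCnt P (k + 1) = pvCnt P k + 1 := by
  unfold pvCnt
  rw [List.range_succ, List.countP_append]
  simp only [List.countP_cons, List.countP_nil]
  rw [@decide_eq_true _ (Classical.propDecidable _) h]
  simp

theorem pvCnt_succ_not (P : Nat → Prop) (k : Nat) (h : ¬ P k) :
    pvCnt P (k + 1) = pvCnt P k := by
  unfold pvCnt
  rw [List.range_succ, List.countP_append]
  simp only [List.countP_cons, List.countP_nil]
  rw [@decide_eq_false _ (Classical.propDecidable _) h]
  simp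

theorem pvCnt_congr (P Q : Nat → Prop) (k : Nat) (h : ∀ v < k, P v ↔ Q v) :
    pvCnt P k = pvCnt Q k := by
  unfold pvCnt
  apply List.countP_congr
  intro v hv
  simp only [List.mem_range] at hv
  rw [decide_eq_decide.mpr (h v hv)]

theorem pvFoldCount (b : Nat → Bool) (k : Nat) :
    ∀ c : Nat, (List.range k).foldl (fun c v => if b v then c + 1 else c) c =
      c + pvCnt (fun v => b v = true) k := by
  induction k with
  | zero => intro c; simp [pvCnt]
  | succ k ih =>
    intro c
    rw [List.range_succ, List.foldl_append, List.foldl_cons, List.foldl_nil, ih c]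
    by_cases hb : b k = true
    · rw [if_pos hb, pvCnt_succ_of _ _ hb]
      omega
    · rw [if_neg hb, pvCnt_succ_not _ _ hb]

-- the carente-induced edge relation and its connectivity
def pvE (g : List (List Int)) (car : List Bool) (u w : Nat) : Prop :=
  car.getD u false = true ∧ car.getD w false = true ∧ (w : Int) ∈ g.getD u []

def pvConn (g : List (List Int)) (car : List Bool) : Nat → Nat → Prop :=
  Relation.ReflTransGen (pvE g car)

theorem pvConn_car {g : List (List Int)} {car : List Bool} {u i : Nat}
    (h : pvConn g car u i) : u = i ∨ car.getD i false = true := by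
  induction h with
  | refl => exact Or.inl rfl
  | tail _ hstep _ => exact Or.inr hstep.2.1

theorem pvEqvGen_eq_conn {g : List (List Int)} {car : List Bool}
    (hsym : Symmetric (pvE g car)) (u i : Nat) :
    Relation.EqvGen (pvE g car) u i ↔ pvConn g car u i := by
  constructor
  · intro h
    induction h with
    | rel _ _ hr => exact Relation.ReflTransGen.single hr
    | refl => exact Relation.ReflTransGen.refl
    | symm x y _ ih => exact (Relation.ReflTransGen.symmetric hsym) ih
    | trans x y z _ _ ih1 ih2 => exact ih1.trans ih2
  · intro h
    induction h with
    | refl => exact Relation.EqvGen.refl _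
    | tail _ hstep ih => exact ih.trans _ _ _ (Relation.EqvGen.rel _ _ hstep)

theorem pvEqvGen_congr {r r' : Nat → Nat → Prop} (h : ∀ x y, r x y ↔ r' x y) (x y : Nat) :
    Relation.EqvGen r x y ↔ Relation.EqvGen r' x y := by
  constructor <;> intro hg
  · exact Relation.EqvGen.mono (fun a b hab => (h a b).mp hab) hg
  · exact Relation.EqvGen.mono (fun a b hab => (h a b).mpr hab) hg

theorem pvEqvGen_push (r : Nat → Nat → Prop) (a b : Nat) (x y : Nat) :
    Relation.EqvGen (fun x y => r x y ∨ (x = a ∧ y = b)) x y ↔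
      (Relation.EqvGen r x y ∨
       (Relation.EqvGen r x a ∧ Relation.EqvGen r b y) ∨
       (Relation.EqvGen r x b ∧ Relation.EqvGen r a y)) := by
  constructor
  · intro h
    induction h with
    | rel u v huv =>
      rcases huv with h | ⟨ha, hb⟩
      · exact Or.inl (Relation.EqvGen.rel _ _ h)
      · subst ha; subst hb
        exact Or.inr (Or.inl ⟨Relation.EqvGen.refl _, Relation.EqvGen.refl _⟩)
    | refl u => exact Or.inl (Relation.EqvGen.refl _)
    | symm u v _ ih =>
      rcases ih with h | ⟨h1, h2⟩ | ⟨h1, h2⟩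
      · exact Or.inl (h.symm _ _)
      · exact Or.inr (Or.inr ⟨h2.symm _ _, h1.symm _ _⟩)
      · exact Or.inr (Or.inl ⟨h2.symm _ _, h1.symm _ _⟩)
    | trans u v z _ _ ih1 ih2 =>
      rcases ih1 with h1 | ⟨h1, h1'⟩ | ⟨h1, h1'⟩ <;>
        rcases ih2 with h2 | ⟨h2, h2'⟩ | ⟨h2, h2'⟩
      · exact Or.inl (h1.trans _ _ _ h2)
      · exact Or.inr (Or.inl ⟨h1.trans _ _ _ h2, h2'⟩)
      · exact Or.inr (Or.inr ⟨h1.trans _ _ _ h2, h2'⟩)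
      · exact Or.inr (Or.inl ⟨h1, h1'.trans _ _ _ h2⟩)
      · exact Or.inl (h1.trans _ _ _
          (((h2.symm _ _).trans _ _ _ (h1'.symm _ _)).trans _ _ _ h2'))
      · exact Or.inl (h1.trans _ _ _ h2')
      · exact Or.inr (Or.inr ⟨h1, h1'.trans _ _ _ h2⟩)
      · exact Or.inl (h1.trans _ _ _ h2')
      · exact Or.inr (Or.inr ⟨h1, h2'⟩)
  · intro h
    have hmono : ∀ u v, Relation.EqvGen r u v →
        Relation.EqvGen (fun x y => r x y ∨ (x = a ∧ y = b)) u v :=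
      fun u v huv => Relation.EqvGen.mono (fun s t hst => Or.inl hst) huv
    have hab : Relation.EqvGen (fun x y => r x y ∨ (x = a ∧ y = b)) a b :=
      Relation.EqvGen.rel _ _ (Or.inr ⟨rfl, rfl⟩)
    rcases h with h | ⟨h1, h2⟩ | ⟨h1, h2⟩
    · exact hmono _ _ h
    · exact ((hmono _ _ h1).trans _ _ _ hab).trans _ _ _ (hmono _ _ h2)
    · exact ((hmono _ _ h1).trans _ _ _ (hab.symm _ _)).trans _ _ _ (hmono _ _ h2)

theorem pvEqvGen_empty (r : Nat → Nat → Prop) (hr : ∀ a b, ¬ r a b) (x y : Nat) :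
    Relation.EqvGen r x y ↔ x = y := by
  constructor
  · intro h
    induction h with
    | rel a b hab => exact absurd hab (hr a b)
    | refl a => rfl
    | symm a b _ ih => exact ih.symm
    | trans a b c _ _ ih1 ih2 => exact ih1.trans ih2
  · rintro rfl
    exact Relation.EqvGen.refl x

theorem pvConn_marked {g : List (List Int)} {car : List Bool} (M : Nat → Prop)
    (hcl : ∀ a b, M a → pvE g car a b → M b) {u i : Nat}
    (hu : M u) (h : pvConn g car u i) : M i := by
  induction h with
  | refl => exact hu
  | tail _ hstep ih => exact hcl _ _ ih hstep

-- both carente passes compute the pointwise pvCarCond table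
theorem pvCarente_aux (atr : List Int) (cont : List (List Int))
    (step : List Bool → Nat → List Bool)
    (hstep : ∀ car v, step car v = if pvCarCond atr cont v then car.set v true else car) :
    ∀ (k : Nat) (init : List Bool),
    ((List.range k).foldl step init).length = init.length ∧
    ∀ v, ((List.range k).foldl step init).getD v false =
      (init.getD v false || (decide (v < k) && decide (v < init.length) && pvCarCond atr cont v)) := by
  intro k
  induction k with
  | zero => intro init; simp
  | succ k ih =>
    intro init
    rw [List.range_succ, List.foldl_append]
    simp only [List.foldl_cons, List.foldl_nil]
    rw [hstep]
    obtain ⟨ihl, ihg⟩ := ih init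
    by_cases hc : pvCarCond atr cont k
    · simp only [hc, if_true]
      refine ⟨by simp [ihl], ?_⟩
      intro v
      by_cases hv : v = k
      · subst hv
        by_cases hlt : v < init.length
        · rw [List.getD_eq_getElem _ _ (by simp [ihl, hlt]), List.getElem_set_self (by simp [ihl, hlt])]
          simp [hlt, hc]
        · rw [List.set_eq_of_length_le (by rw [ihl]; omega), ihg v]
          simp [hlt]
      · rw [List.getD_eq_getElem?_getD, List.getElem?_set_ne (by omega), ← List.getD_eq_getElem?_getD, ihg v]
        have : (decide (v < k + 1) : Bool) = decide (v < k) := by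
          simp only [decide_eq_decide]; omega
        rw [this]
    · rw [if_neg hc]
      refine ⟨ihl, ?_⟩
      intro v
      rw [ihg v]
      by_cases hv : v = k
      · subst hv; simp [hc]
      · have : (decide (v < k + 1) : Bool) = decide (v < k) := by
          simp only [decide_eq_decide]; omega
        rw [this]

theorem pvStepA_eq (atr : List Int) (cont : List (List Int)) (car : List Bool) (v : Nat) :
    (let val := atr.getD v 0
     let pos := (cont.getD v []).getD 1 0 + (cont.getD v []).getD 2 0
     if val = 1 ∨ val = 2 then (if pos = 0 then car.set v true else car)
     else if val = -1 then (if pos = 0 then car.set v true else car)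
     else car) = if pvCarCond atr cont v then car.set v true else car := by
  simp only [pvCarCond]
  split_ifs <;> simp_all <;> omega

theorem pvStepB_eq (atr : List Int) (cont : List (List Int)) (car : List Bool) (v : Nat) :
    (let val := atr.getD v 0
     let pos := (cont.getD v []).getD 1 0 + (cont.getD v []).getD 2 0
     if (val = -1 ∨ val = 1 ∨ val = 2) ∧ pos = 0 then car.set v true else car) =
    if pvCarCond atr cont v then car.set v true else car := by
  simp only [pvCarCond]
  split_ifs <;> simp_all <;> omega

theorem pvCarenteA_len (atr : List Int) (cont : List (List Int)) (n : Nat) :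
    (pvCarenteA atr cont n).length = n := by
  have := (pvCarente_aux atr cont _ (fun car v => pvStepA_eq atr cont car v) n
    (List.replicate n false)).1
  simpa [pvCarenteA] using this

theorem pvCarenteA_getD (atr : List Int) (cont : List (List Int)) (n : Nat) (v : Nat) :
    (pvCarenteA atr cont n).getD v false = (decide (v < n) && pvCarCond atr cont v) := by
  have := (pvCarente_aux atr cont _ (fun car v => pvStepA_eq atr cont car v) n
    (List.replicate n false)).2 v
  simp only [pvCarenteA]
  rw [this]
  by_cases h : v < n <;> simp [h, List.getD_replicate]

theorem pvCarenteA_eq_carenteB (atr : List Int) (cont : List (List Int)) (n : Nat) :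
    pvCarenteA atr cont n = pvCarenteB atr cont n := by
  unfold pvCarenteA pvCarenteB
  rw [show (fun (car : List Bool) v =>
      let val := atr.getD v 0
      let pos := (cont.getD v []).getD 1 0 + (cont.getD v []).getD 2 0
      if val = 1 ∨ val = 2 then (if pos = 0 then car.set v true else car)
      else if val = -1 then (if pos = 0 then car.set v true else car)
      else car) = fun car v => if pvCarCond atr cont v then car.set v true else car
    from funext fun car => funext fun v => pvStepA_eq atr cont car v]
  rw [show (fun (car : List Bool) v =>
      let val := atr.getD v 0
      let pos := (cont.getD v []).getD 1 0 + (cont.getD v []).getD 2 0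
      if (val = -1 ∨ val = 1 ∨ val = 2) ∧ pos = 0 then car.set v true else car) =
      fun car v => if pvCarCond atr cont v then car.set v true else car
    from funext fun car => funext fun v => pvStepB_eq atr cont car v]

-- A side: BFS marks exactly the union of the components of the started vertices
theorem pvInnerFold (car : List Bool) (row : List Int) :
    ∀ (vis : List Bool) (q : List Nat), vis.length = car.length →
    (let st := row.foldl
      (fun (st : List Bool × List Nat) w =>
        if car.getD w.toNat false && !(st.1.getD w.toNat false)
        then (st.1.set w.toNat true, st.2 ++ [w.toNat]) else st) (vis, q)
     st.1.length = vis.length ∧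
     (∀ i, st.1.getD i false = true ↔
        (vis.getD i false = true ∨ (∃ w ∈ row, w.toNat = i ∧ car.getD i false = true))) ∧
     (∃ news, st.2 = q ++ news ∧ ∀ x ∈ news, ∃ w ∈ row, w.toNat = x ∧ car.getD x false = true) ∧
     (∀ i, st.1.getD i false = true → vis.getD i false = true ∨ i ∈ st.2) ∧
     st.1.count false + st.2.length = vis.count false + q.length) := by
  induction row with
  | nil =>
    intro vis q hlen
    exact ⟨rfl, fun i => by simp, ⟨[], by simp⟩, fun i h => Or.inl h, by simp⟩
  | cons w t ih =>
    intro vis q hlen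
    simp only [List.foldl_cons]
    by_cases hcar : car.getD w.toNat false = true
    · by_cases hvis : vis.getD w.toNat false = true
      · -- skip branch (already marked)
        rw [show (car.getD w.toNat false && !(vis.getD w.toNat false)) = false from by
          rw [hcar, hvis]; rfl, if_neg Bool.false_ne_true]
        obtain ⟨c1, c2, c3, c4, c5⟩ := ih vis q hlen
        refine ⟨c1, ?_, ?_, c4, c5⟩
        · intro i
          rw [c2 i]
          constructor
          · rintro (h | ⟨w', hw', hi, hci⟩)
            · exact Or.inl h
            · exact Or.inr ⟨w', List.mem_cons_of_mem _ hw', hi, hci⟩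
          · rintro (h | ⟨w', hw', hi, hci⟩)
            · exact Or.inl h
            · rcases List.mem_cons.mp hw' with hw' | hw'
              · subst hw'; subst hi; exact Or.inl hvis
              · exact Or.inr ⟨w', hw', hi, hci⟩
        · obtain ⟨news, hn, hm⟩ := c3
          exact ⟨news, hn, fun x hx => by
            obtain ⟨w', hw', hi, hci⟩ := hm x hx
            exact ⟨w', List.mem_cons_of_mem _ hw', hi, hci⟩⟩
      · -- mark-and-enqueue branch
        have hv' : vis.getD w.toNat false = false := by
          revert hvis; cases vis.getD w.toNat false <;> simp
        rw [show (car.getD w.toNat false && !(vis.getD w.toNat false)) = true from by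
          rw [hcar, hv']; rfl, if_pos rfl]
        have hi0 : w.toNat < vis.length := by
          rw [hlen]; exact pvGetD_true_lt car _ hcar
        have hlen' : (vis.set w.toNat true).length = car.length := by simp [hlen]
        obtain ⟨c1, c2, c3, c4, c5⟩ := ih (vis.set w.toNat true) (q ++ [w.toNat]) hlen'
        have hset : ∀ i, (vis.set w.toNat true).getD i false =
            (if i = w.toNat then true else vis.getD i false) := by
          intro i
          by_cases hi : i = w.toNat
          · subst hi
            rw [List.getD_eq_getElem _ _ (by simpa using hi0), List.getElem_set_self (by simpa using hi0)]
            simp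
          · rw [if_neg hi, List.getD_eq_getElem?_getD, List.getElem?_set_ne (fun hh => hi hh.symm),
              ← List.getD_eq_getElem?_getD]
        refine ⟨by rw [c1]; simp, ?_, ?_, ?_, ?_⟩
        · intro i
          rw [c2 i, hset i]
          by_cases hi : i = w.toNat
          · subst hi
            simp only [if_pos rfl]
            constructor
            · intro _; exact Or.inr ⟨w, List.mem_cons_self, rfl, hcar⟩
            · intro _; exact Or.inl rfl
          · rw [if_neg hi]
            constructor
            · rintro (h | ⟨w', hw', hiw, hci⟩)
              · exact Or.inl h
              · exact Or.inr ⟨w', List.mem_cons_of_mem _ hw', hiw, hci⟩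
            · rintro (h | ⟨w', hw', hiw, hci⟩)
              · exact Or.inl h
              · rcases List.mem_cons.mp hw' with hw' | hw'
                · exact absurd (hw' ▸ hiw.symm) hi
                · exact Or.inr ⟨w', hw', hiw, hci⟩
        · obtain ⟨news, hn, hm⟩ := c3
          refine ⟨w.toNat :: news, by simpa using hn, ?_⟩
          intro x hx
          rcases List.mem_cons.mp hx with hx | hx
          · exact ⟨w, List.mem_cons_self, hx.symm, hx ▸ hcar⟩
          · obtain ⟨w', hw', hiw, hci⟩ := hm x hx
            exact ⟨w', List.mem_cons_of_mem _ hw', hiw, hci⟩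
        · intro i hmark
          rcases c4 i hmark with h | h
          · rw [hset i] at h
            by_cases hi : i = w.toNat
            · subst hi
              obtain ⟨news, hn, _⟩ := c3
              exact Or.inr (by rw [hn]; simp)
            · rw [if_neg hi] at h; exact Or.inl h
          · exact Or.inr h
        · have hcf : (vis.set w.toNat true).count false + 1 = vis.count false :=
            pvCount_false_set vis _ hi0 hv'
          rw [c5]
          simp only [List.length_append, List.length_cons, List.length_nil]
          omega
    · -- carente check fails
      have hc' : car.getD w.toNat false = false := by
        revert hcar; cases car.getD w.toNat false <;> simp
      rw [show (car.getD w.toNat false && !(vis.getD w.toNat false)) = false from by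
        rw [hc']; rfl, if_neg Bool.false_ne_true]
      obtain ⟨c1, c2, c3, c4, c5⟩ := ih vis q hlen
      refine ⟨c1, ?_, ?_, c4, c5⟩
      · intro i
        rw [c2 i]
        constructor
        · rintro (h | ⟨w', hw', hi, hci⟩)
          · exact Or.inl h
          · exact Or.inr ⟨w', List.mem_cons_of_mem _ hw', hi, hci⟩
        · rintro (h | ⟨w', hw', hi, hci⟩)
          · exact Or.inl h
          · rcases List.mem_cons.mp hw' with hw' | hw'
            · exact absurd (hw' ▸ hi ▸ hci) hcar
            · exact Or.inr ⟨w', hw', hi, hci⟩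
      · obtain ⟨news, hn, hm⟩ := c3
        exact ⟨news, hn, fun x hx => by
          obtain ⟨w', hw', hi, hci⟩ := hm x hx
          exact ⟨w', List.mem_cons_of_mem _ hw', hi, hci⟩⟩

theorem pvBfsA_correct (g : List (List Int)) (car : List Bool)
    (hrow : ∀ u, car.getD u false = true → ∀ w ∈ g.getD u [], 0 ≤ w) :
    ∀ (fuel : Nat) (q : List Nat) (vis : List Bool),
    vis.length = car.length →
    (∀ u ∈ q, vis.getD u false = true ∧ car.getD u false = true) →
    (∀ u w, vis.getD u false = true → pvE g car u w → vis.getD w false = true ∨ u ∈ q) →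
    q.length + vis.count false ≤ fuel →
    (let res := pvBfsA g car fuel q vis
     res.length = car.length ∧
     (∀ i, vis.getD i false = true → res.getD i false = true) ∧
     (∀ u w, res.getD u false = true → pvE g car u w → res.getD w false = true) ∧
     (∀ i, res.getD i false = true → vis.getD i false = true ∨ ∃ u ∈ q, pvConn g car u i)) := by
  intro fuel
  induction fuel with
  | zero =>
    intro q vis hlen hq hclosed hfuel
    have hq0 : q = [] := List.length_eq_zero_iff.mp (by omega)
    subst hq0
    refine ⟨hlen, fun i h => h, ?_, fun i h => Or.inl h⟩
    intro u w hu hE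
    rcases hclosed u w hu hE with h | h
    · exact h
    · simp at h
  | succ fuel ih =>
    intro q vis hlen hq hclosed hfuel
    match q with
    | [] =>
      refine ⟨hlen, fun i h => h, ?_, fun i h => Or.inl h⟩
      intro u w hu hE
      rcases hclosed u w hu hE with h | h
      · exact h
      · simp at h
    | u :: q =>
      obtain ⟨c1, c2, c3, c4, c5⟩ := pvInnerFold car (g.getD u []) vis q hlen
      set st := (g.getD u []).foldl
        (fun (st : List Bool × List Nat) w =>
          if car.getD w.toNat false && !(st.1.getD w.toNat false)
          then (st.1.set w.toNat true, st.2 ++ [w.toNat]) else st) (vis, q) with hst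
      have hcaru : car.getD u false = true := (hq u List.mem_cons_self).2
      have hbfs : pvBfsA g car (fuel + 1) (u :: q) vis = pvBfsA g car fuel st.2 st.1 := by
        rw [pvBfsA]
      -- E-step from u lands marked in st.1
      have hEu : ∀ b, pvE g car u b → st.1.getD b false = true := by
        intro b hE
        exact (c2 b).mpr (Or.inr ⟨(b : Int), hE.2.2, Int.toNat_natCast b, hE.2.1⟩)
      have hq' : ∀ x ∈ st.2, st.1.getD x false = true ∧ car.getD x false = true := by
        intro x hx
        obtain ⟨news, hn, hm⟩ := c3
        rw [hn] at hx
        rcases List.mem_append.mp hx with hx | hx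
        · have := hq x (List.mem_cons_of_mem _ hx)
          exact ⟨(c2 x).mpr (Or.inl this.1), this.2⟩
        · obtain ⟨w', hw', hiw, hci⟩ := hm x hx
          exact ⟨(c2 x).mpr (Or.inr ⟨w', hw', hiw, hci⟩), hci⟩
      have hclosed' : ∀ a b, st.1.getD a false = true → pvE g car a b →
          st.1.getD b false = true ∨ a ∈ st.2 := by
        intro a b ha hE
        rcases c4 a ha with hva | hain
        · rcases hclosed a b hva hE with h | h
          · exact Or.inl ((c2 b).mpr (Or.inl h))
          · rcases List.mem_cons.mp h with h | h
            · subst h; exact Or.inl (hEu b hE)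
            · obtain ⟨news, hn, _⟩ := c3
              exact Or.inr (by rw [hn]; exact List.mem_append_left _ h)
        · exact Or.inr hain
      have hlen' : st.1.length = car.length := by rw [c1, hlen]
      have hfuel' : st.2.length + st.1.count false ≤ fuel := by
        simp only [List.length_cons] at hfuel
        omega
      obtain ⟨r1, r2, r3, r4⟩ := ih st.2 st.1 hlen' hq' hclosed' (by omega)
      rw [hbfs]
      refine ⟨r1, ?_, r3, ?_⟩
      · intro i h
        exact r2 i ((c2 i).mpr (Or.inl h))
      · intro i hi
        rcases r4 i hi with hsti | ⟨x, hx, hconn⟩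
        · rcases (c2 i).mp hsti with h | ⟨w', hw', hiw, hci⟩
          · exact Or.inl h
          · have hw0 : (0 : Int) ≤ w' := hrow u hcaru w' hw'
            have hwi : w' = (i : Int) := by rw [← hiw, Int.toNat_of_nonneg hw0]
            have hE : pvE g car u i := ⟨hcaru, hci, by rw [← hwi]; exact hw'⟩
            exact Or.inr ⟨u, List.mem_cons_self, Relation.ReflTransGen.single hE⟩
        · obtain ⟨news, hn, hm⟩ := c3
          rw [hn] at hx
          rcases List.mem_append.mp hx with hx | hx
          · exact Or.inr ⟨x, List.mem_cons_of_mem _ hx, hconn⟩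
          · obtain ⟨w', hw', hiw, hci⟩ := hm x hx
            have hw0 : (0 : Int) ≤ w' := hrow u hcaru w' hw'
            have hwx : w' = (x : Int) := by rw [← hiw, Int.toNat_of_nonneg hw0]
            have hE : pvE g car u x := ⟨hcaru, hci, by rw [← hwx]; exact hw'⟩
            exact Or.inr ⟨u, List.mem_cons_self,
              (Relation.ReflTransGen.single hE).trans hconn⟩

def pvStart (g : List (List Int)) (car : List Bool) (v : Nat) : Prop :=
  car.getD v false = true ∧ ¬ ∃ u < v, car.getD u false = true ∧ pvConn g car u v

theorem pvOuterA (g : List (List Int)) (car : List Bool)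
    (hcl : car.length = g.length)
    (hrow : ∀ u, car.getD u false = true → ∀ w ∈ g.getD u [], 0 ≤ w) :
    ∀ k, k ≤ g.length →
    (let st := (List.range k).foldl (fun (st : List Bool × Nat) v =>
        if car.getD v false && !(st.1.getD v false)
        then (pvBfsA g car (g.length + 1) [v] (st.1.set v true), st.2 + 1)
        else st) (List.replicate g.length false, 0)
     st.1.length = car.length ∧
     (∀ i, st.1.getD i false = true ↔
        (car.getD i false = true ∧ ∃ u < k, car.getD u false = true ∧ pvConn g car u i)) ∧
     st.2 = pvCnt (pvStart g car) k) := by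
  intro k
  induction k with
  | zero =>
    intro _
    refine ⟨by simp [hcl], ?_, by simp [pvCnt]⟩
    intro i
    simp [List.getD_replicate]
  | succ k ih =>
    intro hk1
    have hk : k < g.length := by omega
    obtain ⟨i1, i2, i3⟩ := ih (by omega)
    rw [List.range_succ, List.foldl_append, List.foldl_cons, List.foldl_nil]
    set stk := (List.range k).foldl (fun (st : List Bool × Nat) v =>
        if car.getD v false && !(st.1.getD v false)
        then (pvBfsA g car (g.length + 1) [v] (st.1.set v true), st.2 + 1)
        else st) (List.replicate g.length false, 0) with hstk
    by_cases hcark : car.getD k false = true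
    · by_cases hvisk : stk.1.getD k false = true
      · -- already visited: skip
        rw [show (car.getD k false && !(stk.1.getD k false)) = false from by
          rw [hcark, hvisk]; rfl, if_neg Bool.false_ne_true]
        obtain ⟨u0, hu0k, hcu0, hconn0⟩ := ((i2 k).mp hvisk).2
        have hnostart : ¬ pvStart g car k := by
          rintro ⟨-, hno⟩
          exact hno ⟨u0, hu0k, hcu0, hconn0⟩
        refine ⟨i1, ?_, ?_⟩
        · intro i
          rw [i2 i]
          constructor
          · rintro ⟨hci, u, hu, hcu, hconn⟩
            exact ⟨hci, u, by omega, hcu, hconn⟩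
          · rintro ⟨hci, u, hu, hcu, hconn⟩
            rcases Nat.lt_succ_iff_lt_or_eq.mp hu with hu | hu
            · exact ⟨hci, u, hu, hcu, hconn⟩
            · subst hu
              exact ⟨hci, u0, hu0k, hcu0, hconn0.trans hconn⟩
        · rw [i3, pvCnt_succ_not (pvStart g car) k hnostart]
      · -- fresh start: BFS from k
        rw [show (car.getD k false && !(stk.1.getD k false)) = true from by
          rw [hcark, show stk.1.getD k false = false from by
            revert hvisk; cases stk.1.getD k false <;> simp]; rfl, if_pos rfl]
        have hklen : k < stk.1.length := by rw [i1, hcl]; exact hk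
        have hset : ∀ i, (stk.1.set k true).getD i false =
            (if i = k then true else stk.1.getD i false) := by
          intro i
          by_cases hi : i = k
          · subst hi
            rw [List.getD_eq_getElem _ _ (by simpa using hklen),
              List.getElem_set_self (by simpa using hklen)]
            simp
          · rw [if_neg hi, List.getD_eq_getElem?_getD, List.getElem?_set_ne (fun hh => hi hh.symm),
              ← List.getD_eq_getElem?_getD]
        have hstart : pvStart g car k := by
          refine ⟨hcark, ?_⟩
          rintro ⟨u, hu, hcu, hconn⟩
          exact hvisk ((i2 k).mpr ⟨hcark, u, hu, hcu, hconn⟩)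
        obtain ⟨r1, r2, r3, r4⟩ := pvBfsA_correct g car hrow (g.length + 1) [k]
          (stk.1.set k true)
          (by simp [i1])
          (by
            intro u hu
            rcases List.mem_cons.mp hu with hu | hu
            · rw [hu]
              refine ⟨by rw [hset k]; simp, hcark⟩
            · simp at hu)
          (by
            intro a b ha hE
            rw [hset a] at ha
            by_cases hak : a = k
            · exact Or.inr (by simp [hak])
            · rw [if_neg hak] at ha
              obtain ⟨hca, u, hu, hcu, hconn⟩ := (i2 a).mp ha
              refine Or.inl ?_
              rw [hset b, if_neg ?hbk]
              case hbk =>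
                intro hbk
                subst hbk
                exact hvisk ((i2 b).mpr ⟨hE.2.1, u, hu, hcu, hconn.tail hE⟩)
              exact (i2 b).mpr ⟨hE.2.1, u, hu, hcu, hconn.tail hE⟩)
          (by
            have h1 : (stk.1.set k true).count false ≤ (stk.1.set k true).length :=
              List.count_le_length
            simp only [List.length_set, i1, hcl] at h1
            simp only [List.length_cons, List.length_nil]
            omega)
        refine ⟨r1, ?_, ?_⟩
        · intro i
          constructor
          · intro hres
            rcases r4 i hres with hv0 | ⟨u, hu, hconn⟩
            · rw [hset i] at hv0
              by_cases hik : i = k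
              · exact ⟨by rw [hik]; exact hcark, k, by omega, hcark,
                  by rw [hik]; exact Relation.ReflTransGen.refl⟩
              · rw [if_neg hik] at hv0
                obtain ⟨hci, u, hu, hcu, hconn⟩ := (i2 i).mp hv0
                exact ⟨hci, u, by omega, hcu, hconn⟩
            · rcases List.mem_cons.mp hu with hu | hu
              · rw [hu] at hconn
                have hci : car.getD i false = true := by
                  rcases pvConn_car hconn with h | h
                  · exact h ▸ hcark
                  · exact h
                exact ⟨hci, k, by omega, hcark, hconn⟩
              · simp at hu
          · rintro ⟨hci, u, hu, hcu, hconn⟩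
            rcases Nat.lt_succ_iff_lt_or_eq.mp hu with hu | hu
            · exact r2 i (by rw [hset i]; split <;> [rfl; exact (i2 i).mpr ⟨hci, u, hu, hcu, hconn⟩])
            · rw [hu] at hconn
              exact pvConn_marked (fun x => (pvBfsA g car (g.length + 1) [k] (stk.1.set k true)).getD x false = true)
                r3 (r2 k (by rw [hset k]; simp)) hconn
        · rw [i3, pvCnt_succ_of (pvStart g car) k hstart]
    · -- not carente: skip
      rw [show (car.getD k false && !(stk.1.getD k false)) = false from by
        rw [show car.getD k false = false from by
          revert hcark; cases car.getD k false <;> simp]; rfl, if_neg Bool.false_ne_true]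
      have hck : car.getD k false = false := by
        revert hcark; cases car.getD k false <;> simp
      refine ⟨i1, ?_, ?_⟩
      · intro i
        rw [i2 i]
        constructor
        · rintro ⟨hci, u, hu, hcu, hconn⟩
          exact ⟨hci, u, by omega, hcu, hconn⟩
        · rintro ⟨hci, u, hu, hcu, hconn⟩
          rcases Nat.lt_succ_iff_lt_or_eq.mp hu with hu | hu
          · exact ⟨hci, u, hu, hcu, hconn⟩
          · subst hu
            rw [hck] at hcu
            simp at hcu
      · rw [i3, pvCnt_succ_not (pvStart g car) k
          (by rintro ⟨h, -⟩; rw [hck] at h; simp at h)]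

-- B side: union-find roots
def pvRoot (p : List Nat) (x : Nat) : Nat :=
  if h : p.getD x x < x then pvRoot p (p.getD x x) else x
  termination_by x
  decreasing_by exact h

def pvInv (p : List Nat) : Prop := ∀ x, p.getD x x ≤ x

theorem pvRoot_le (p : List Nat) (x : Nat) : pvRoot p x ≤ x := by
  induction x using Nat.strong_induction_on with
  | _ x ih =>
    rw [pvRoot]
    split
    · exact le_of_lt (lt_of_le_of_lt (ih _ (by assumption)) (by assumption))
    · exact le_refl x

theorem pvRoot_not_lt (p : List Nat) (x : Nat) :
    ¬ p.getD (pvRoot p x) (pvRoot p x) < pvRoot p x := by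
  induction x using Nat.strong_induction_on with
  | _ x ih =>
    rw [pvRoot]
    split
    · exact ih _ (by assumption)
    · assumption

theorem pvRoot_fix (p : List Nat) (hp : pvInv p) (x : Nat) :
    p.getD (pvRoot p x) (pvRoot p x) = pvRoot p x :=
  le_antisymm (hp _) (le_of_not_gt (pvRoot_not_lt p x))

theorem pvRoot_idem (p : List Nat) (hp : pvInv p) (x : Nat) :
    pvRoot p (pvRoot p x) = pvRoot p x := by
  rw [pvRoot, dif_neg (pvRoot_not_lt p x)]

theorem pvFind_eq_root (p : List Nat) (hp : pvInv p) :
    ∀ (f x : Nat), x < f → pvFind p f x = pvRoot p x := by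
  intro f
  induction f with
  | zero => intro x hx; omega
  | succ f ih =>
    intro x hx
    rw [pvFind]
    by_cases he : p.getD x x = x
    · rw [if_pos he, pvRoot, dif_neg (by omega)]
    · have hlt : p.getD x x < x := lt_of_le_of_ne (hp x) he
      rw [if_neg he, ih _ (by omega)]
      conv_rhs => rw [pvRoot, dif_pos hlt]

theorem pvRoot_set (p : List Nat) (hp : pvInv p) (M m : Nat) (hm : m < M)
    (hM : M < p.length) (hroot : p.getD M M = M) (hmroot : p.getD m m = m) :
    ∀ x, pvRoot (p.set M m) x = if pvRoot p x = M then m else pvRoot p x := by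
  have hgset : ∀ i, (p.set M m).getD i i = if i = M then m else p.getD i i := by
    intro i
    by_cases hi : i = M
    · subst hi
      rw [List.getD_eq_getElem _ _ (by simpa using hM), List.getElem_set_self (by simpa using hM)]
      simp
    · rw [if_neg hi, List.getD_eq_getElem?_getD, List.getElem?_set_ne (fun hh => hi hh.symm),
        ← List.getD_eq_getElem?_getD]
  intro x
  induction x using Nat.strong_induction_on with
  | _ x ih =>
    rw [pvRoot, hgset x]
    by_cases hx : x = M
    · subst hx
      rw [if_pos rfl, dif_pos hm, ih m hm]
      have hrm : pvRoot p m = m := by rw [pvRoot, dif_neg (by omega)]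
      rw [hrm, if_neg (by omega)]
      have hrx : pvRoot p x = x := by rw [pvRoot, dif_neg (by rw [hroot]; omega)]
      rw [hrx, if_pos rfl]
    · rw [if_neg hx]
      by_cases hlt : p.getD x x < x
      · rw [dif_pos hlt, ih _ hlt]
        conv_rhs => rw [pvRoot, dif_pos hlt]
      · rw [dif_neg hlt]
        have hrx : pvRoot p x = x := by rw [pvRoot, dif_neg hlt]
        rw [hrx, if_neg hx]

def pvGood (n : Nat) (p : List Nat) (r : Nat → Nat → Prop) : Prop :=
  p.length = n ∧ pvInv p ∧ (∀ x y, pvRoot p x = pvRoot p y ↔ Relation.EqvGen r x y)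

theorem pvGood_congr {n : Nat} {p : List Nat} {r r' : Nat → Nat → Prop}
    (h : ∀ x y, r x y ↔ r' x y) (hg : pvGood n p r) : pvGood n p r' :=
  ⟨hg.1, hg.2.1, fun x y => (hg.2.2 x y).trans (pvEqvGen_congr h x y)⟩

-- after one union on endpoints {s,t} (set root t := root s), sameness of roots is the
-- equivalence closure extended by the pair

theorem pvUnionKey (n : Nat) (p : List Nat) (r : Nat → Nat → Prop)
    (hlen : p.length = n) (hinv : pvInv p)
    (hiff : ∀ x y, pvRoot p x = pvRoot p y ↔ Relation.EqvGen r x y)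
    (s t : Nat) (ht : t < n)
    (hlt : pvRoot p s < pvRoot p t) :
    (p.set (pvRoot p t) (pvRoot p s)).length = n ∧ pvInv (p.set (pvRoot p t) (pvRoot p s)) ∧
    (∀ x y, pvRoot (p.set (pvRoot p t) (pvRoot p s)) x = pvRoot (p.set (pvRoot p t) (pvRoot p s)) y ↔
      (Relation.EqvGen r x y ∨
       (Relation.EqvGen r x s ∧ Relation.EqvGen r t y) ∨
       (Relation.EqvGen r x t ∧ Relation.EqvGen r s y))) := by
  have hMl : pvRoot p t < p.length := by
    have := pvRoot_le p t; omega
  have hrs := pvRoot_set p hinv (pvRoot p t) (pvRoot p s) hlt hMl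
    (pvRoot_fix p hinv t) (pvRoot_fix p hinv s)
  refine ⟨by simpa using hlen, ?_, ?_⟩
  · intro x
    by_cases hx : x = pvRoot p t
    · subst hx
      rw [List.getD_eq_getElem _ _ (by simpa using hMl),
        List.getElem_set_self (by simpa using hMl)]
      omega
    · rw [List.getD_eq_getElem?_getD, List.getElem?_set_ne (fun hh => hx hh.symm),
        ← List.getD_eq_getElem?_getD]
      exact hinv x
  · intro x y
    rw [hrs x, hrs y]
    by_cases hx : pvRoot p x = pvRoot p t <;> by_cases hy : pvRoot p y = pvRoot p t
    · rw [if_pos hx, if_pos hy]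
      exact iff_of_true rfl (Or.inl ((hiff x y).mp (hx.trans hy.symm)))
    · rw [if_pos hx, if_neg hy]
      constructor
      · intro h
        exact Or.inr (Or.inr ⟨(hiff x t).mp hx, (hiff s y).mp h⟩)
      · rintro (h | ⟨h1, h2⟩ | ⟨h1, h2⟩)
        · exact absurd (((hiff x y).mpr h).symm.trans hx) hy
        · exact absurd ((hiff t y).mpr h2).symm hy
        · exact (hiff s y).mpr h2
    · rw [if_neg hx, if_pos hy]
      constructor
      · intro h
        exact Or.inr (Or.inl ⟨(hiff x s).mp h, (hiff t y).mp hy.symm⟩)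
      · rintro (h | ⟨h1, h2⟩ | ⟨h1, h2⟩)
        · exact absurd (((hiff x y).mpr h).trans hy) hx
        · exact (hiff x s).mpr h1
        · exact absurd ((hiff x t).mpr h1) hx
    · rw [if_neg hx, if_neg hy]
      constructor
      · intro h
        exact Or.inl ((hiff x y).mp h)
      · rintro (h | ⟨h1, h2⟩ | ⟨h1, h2⟩)
        · exact (hiff x y).mpr h
        · exact absurd ((hiff t y).mpr h2).symm hy
        · exact absurd ((hiff x t).mpr h1) hx

theorem pvUnionStep_good (car : List Bool) (n : Nat) (hcl : car.length = n)
    (p : List Nat) (r : Nat → Nat → Prop) (v : Nat) (w : Int)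
    (hvn : v < n) (hg : pvGood n p r) :
    pvGood n (pvUnionStep car p v w) (fun x y => r x y ∨
      (x = v ∧ y = w.toNat ∧ car.getD w.toNat false = true)) := by
  obtain ⟨hlen, hinv, hiff⟩ := hg
  by_cases hcw : car.getD w.toNat false = true
  · have hwn : w.toNat < n := hcl ▸ pvGetD_true_lt car _ hcw
    have hstrip : ∀ x y, (r x y ∨ (x = v ∧ y = w.toNat ∧ car.getD w.toNat false = true)) ↔
        (r x y ∨ (x = v ∧ y = w.toNat)) := by
      intro x y
      exact ⟨fun h => h.elim Or.inl (fun hh => Or.inr ⟨hh.1, hh.2.1⟩),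
        fun h => h.elim Or.inl (fun hh => Or.inr ⟨hh.1, hh.2, hcw⟩)⟩
    rw [pvUnionStep, if_pos hcw]
    have hfv : pvFind p (p.length + 1) v = pvRoot p v :=
      pvFind_eq_root p hinv _ v (by have := pvRoot_le p v; omega)
    have hfw : pvFind p (p.length + 1) w.toNat = pvRoot p w.toNat :=
      pvFind_eq_root p hinv _ w.toNat (by omega)
    simp only [hfv, hfw]
    by_cases hne : pvRoot p v = pvRoot p w.toNat
    · rw [if_neg (by simpa using hne)]
      have hQvw : Relation.EqvGen r v w.toNat := (hiff _ _).mp hne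
      refine ⟨hlen, hinv, ?_⟩
      intro x y
      rw [pvEqvGen_congr (hstrip) x y, pvEqvGen_push r v w.toNat x y, hiff x y]
      constructor
      · exact fun h => Or.inl h
      · rintro (h | ⟨h1, h2⟩ | ⟨h1, h2⟩)
        · exact h
        · exact (h1.trans _ _ _ hQvw).trans _ _ _ h2
        · exact (h1.trans _ _ _ (hQvw.symm _ _)).trans _ _ _ h2
    · rw [if_pos (by simpa using hne)]
      by_cases hlt : pvRoot p v < pvRoot p w.toNat
      · rw [if_pos hlt]
        obtain ⟨k1, k2, k3⟩ := pvUnionKey n p r hlen hinv hiff v w.toNat hwn hlt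
        refine ⟨k1, k2, ?_⟩
        intro x y
        rw [k3 x y, pvEqvGen_congr (hstrip) x y, pvEqvGen_push r v w.toNat x y]
      · rw [if_neg hlt]
        have hlt' : pvRoot p w.toNat < pvRoot p v := by
          rcases Nat.lt_or_ge (pvRoot p w.toNat) (pvRoot p v) with h | h
          · exact h
          · omega
        obtain ⟨k1, k2, k3⟩ := pvUnionKey n p r hlen hinv hiff w.toNat v hvn hlt'
        refine ⟨k1, k2, ?_⟩
        intro x y
        rw [k3 x y, pvEqvGen_congr (hstrip) x y, pvEqvGen_push r v w.toNat x y]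
        constructor
        · rintro (h | ⟨h1, h2⟩ | ⟨h1, h2⟩)
          · exact Or.inl h
          · exact Or.inr (Or.inr ⟨h1, h2⟩)
          · exact Or.inr (Or.inl ⟨h1, h2⟩)
        · rintro (h | ⟨h1, h2⟩ | ⟨h1, h2⟩)
          · exact Or.inl h
          · exact Or.inr (Or.inr ⟨h1, h2⟩)
          · exact Or.inr (Or.inl ⟨h1, h2⟩)
  · rw [pvUnionStep, if_neg (by simpa using hcw)]
    refine ⟨hlen, hinv, ?_⟩
    intro x y
    obtain ⟨-, -, hiff'⟩ := (⟨hlen, hinv, hiff⟩ : pvGood n p r)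
    rw [hiff' x y]
    constructor
    · exact fun h => Relation.EqvGen.mono (fun a b hab => Or.inl hab) h
    · intro h
      have : ∀ a b, (r a b ∨ (a = v ∧ b = w.toNat ∧ car.getD w.toNat false = true)) → Relation.EqvGen r a b := by
        rintro a b (hab | ⟨-, -, hc⟩)
        · exact Relation.EqvGen.rel _ _ hab
        · exact absurd hc hcw
      induction h with
      | rel a b hab => exact this a b hab
      | refl a => exact Relation.EqvGen.refl a
      | symm a b _ ih => exact ih.symm _ _
      | trans a b c _ _ ih1 ih2 => exact ih1.trans _ _ _ ih2

theorem pvUnionRow_good (car : List Bool) (n : Nat) (hcl : car.length = n)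
    (v : Nat) (hvn : v < n) :
    ∀ (l : List Int) (p : List Nat) (r : Nat → Nat → Prop),
    (∀ w ∈ l, 0 ≤ w) → pvGood n p r →
    pvGood n (l.foldl (fun p w => pvUnionStep car p v w) p)
      (fun x y => r x y ∨ (x = v ∧ car.getD y false = true ∧ (y : Int) ∈ l)) := by
  intro l
  induction l with
  | nil =>
    intro p r _ hg
    refine pvGood_congr ?_ hg
    intro x y
    simp
  | cons w t ih =>
    intro p r hnn hg
    rw [List.foldl_cons]
    have h1 := pvUnionStep_good car n hcl p r v w hvn hg
    have h2 := ih (pvUnionStep car p v w) _ (fun w' hw' => hnn w' (List.mem_cons_of_mem _ hw')) h1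
    refine pvGood_congr ?_ h2
    intro x y
    constructor
    · rintro ((h | ⟨hx, hy, hc⟩) | ⟨hx, hc, hm⟩)
      · exact Or.inl h
      · refine Or.inr ⟨hx, hy ▸ hc, ?_⟩
        have hw0 : (0 : Int) ≤ w := hnn w List.mem_cons_self
        rw [hy, Int.toNat_of_nonneg hw0]
        exact List.mem_cons_self
      · exact Or.inr ⟨hx, hc, List.mem_cons_of_mem _ hm⟩
    · rintro (h | ⟨hx, hc, hm⟩)
      · exact Or.inl (Or.inl h)
      · rcases List.mem_cons.mp hm with hm | hm
        · refine Or.inl (Or.inr ⟨hx, ?_, ?_⟩)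
          · rw [← hm, Int.toNat_natCast]
          · rw [← hm, Int.toNat_natCast]
            exact hc
        · exact Or.inr ⟨hx, hc, hm⟩

theorem pvUnionAll_good (g : List (List Int)) (car : List Bool) (hcl : car.length = g.length)
    (hrow : ∀ u, car.getD u false = true → ∀ w ∈ g.getD u [], 0 ≤ w) :
    ∀ k, k ≤ g.length →
    pvGood g.length
      ((List.range k).foldl (fun p v =>
        if car.getD v false then (g.getD v []).foldl (fun p w => pvUnionStep car p v w) p else p)
        (List.range g.length))
      (fun x y => x < k ∧ pvE g car x y) := by
  intro k
  induction k with
  | zero =>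
    intro _
    simp only [List.range_zero, List.foldl_nil]
    have hget0 : ∀ z, (List.range g.length).getD z z = z := by
      intro z
      by_cases hz : z < g.length
      · rw [List.getD_eq_getElem _ _ (by simpa using hz)]
        simp
      · rw [List.getD_eq_default _ _ (by simpa using hz)]
    refine ⟨by simp, fun x => le_of_eq (hget0 x), ?_⟩
    intro x y
    have hroot : ∀ z, pvRoot (List.range g.length) z = z := by
      intro z
      rw [pvRoot, dif_neg (by rw [hget0 z]; omega)]
    rw [hroot x, hroot y, pvEqvGen_empty _ (by rintro a b ⟨h, -⟩; omega)]
  | succ k ih =>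
    intro hk1
    have hk : k < g.length := by omega
    have hgk := ih (by omega)
    rw [List.range_succ, List.foldl_append, List.foldl_cons, List.foldl_nil]
    by_cases hcark : car.getD k false = true
    · rw [if_pos hcark]
      have h2 := pvUnionRow_good car g.length hcl k hk (g.getD k []) _ _
        (hrow k hcark) hgk
      refine pvGood_congr ?_ h2
      intro x y
      constructor
      · rintro (⟨hx, hE⟩ | ⟨hx, hc, hm⟩)
        · exact ⟨by omega, hE⟩
        · exact ⟨by omega, hx ▸ ⟨hcark, hc, hm⟩⟩
      · rintro ⟨hx, hE⟩
        rcases Nat.lt_succ_iff_lt_or_eq.mp hx with hx | hx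
        · exact Or.inl ⟨hx, hE⟩
        · exact Or.inr ⟨hx, hE.2.1, hx ▸ hE.2.2⟩
    · rw [if_neg hcark]
      refine pvGood_congr ?_ hgk
      intro x y
      constructor
      · rintro ⟨hx, hE⟩
        exact ⟨by omega, hE⟩
      · rintro ⟨hx, hE⟩
        rcases Nat.lt_succ_iff_lt_or_eq.mp hx with hx | hx
        · exact ⟨hx, hE⟩
        · exact absurd (hx ▸ hE.1) hcark

theorem pvRoot_self_iff (n : Nat) (p : List Nat) (r : Nat → Nat → Prop)
    (hg : pvGood n p r) (v : Nat) :
    (pvRoot p v = v ↔ ∀ y, Relation.EqvGen r v y → v ≤ y) := by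
  obtain ⟨hlen, hinv, hiff⟩ := hg
  constructor
  · intro hr y hE
    have := (hiff v y).mpr hE
    rw [hr] at this
    rw [this]
    exact pvRoot_le p y
  · intro h
    have hE : Relation.EqvGen r v (pvRoot p v) :=
      (hiff v (pvRoot p v)).mp (pvRoot_idem p hinv v).symm
    have h1 := h _ hE
    have h2 := pvRoot_le p v
    omega

theorem pvStart_iff_min (g : List (List Int)) (car : List Bool)
    (hsym : Symmetric (pvE g car)) (v : Nat) (hv : car.getD v false = true) :
    (pvStart g car v ↔ ∀ y, Relation.EqvGen (pvE g car) v y → v ≤ y) := by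
  constructor
  · rintro ⟨-, hno⟩ y hE
    have hconn : pvConn g car v y := (pvEqvGen_eq_conn hsym v y).mp hE
    by_contra hlt
    have hylt : y < v := by omega
    rcases pvConn_car hconn with h | h
    · omega
    · exact hno ⟨y, hylt, h, (Relation.ReflTransGen.symmetric hsym) hconn⟩
  · intro h
    refine ⟨hv, ?_⟩
    rintro ⟨u, hu, hcu, hconn⟩
    have hE : Relation.EqvGen (pvE g car) v u :=
      ((pvEqvGen_eq_conn hsym u v).mpr hconn).symm _ _
    have := h u hE
    omega

-- the two programs agree
theorem heuristica_v2_agree (atr : List Int) (g : List (List Int)) (cont : List (List Int))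
    (hpre : Pre_heuristica_v2 atr g cont) :
    heuristica_v2 atr g cont = heuristica_v2_alt atr g cont := by
  obtain ⟨hlen1, hlen2, hlen3, hedge⟩ := hpre
  show (let n := g.length
    let soma := atr.foldl (fun s x => if x ≠ -1 then s + x else s) 0
    let car := pvCarenteA atr cont n
    let st := (List.range n).foldl (fun (st : List Bool × Nat) v =>
        if car.getD v false && !(st.1.getD v false)
        then (pvBfsA g car (n + 1) [v] (st.1.set v true), st.2 + 1)
        else st) (List.replicate n false, 0)
    soma + PySem.Int.floordiv ((st.2 : Int) + 1) 2) =
    (let n := g.length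
    let soma := atr.foldl (fun s x => if x ≠ -1 then s + x else s) 0
    let car := pvCarenteB atr cont n
    let parent := (List.range n).foldl (fun p v =>
        if car.getD v false then (g.getD v []).foldl (fun p w => pvUnionStep car p v w) p else p)
      (List.range n)
    let R := (List.range n).foldl (fun (c : Nat) v =>
        if car.getD v false && (pvFind parent (parent.length + 1) v == v) then c + 1 else c) 0
    soma + PySem.Int.floordiv ((R : Int) + 1) 2)
  simp only []
  rw [← pvCarenteA_eq_carenteB]
  set n := g.length with hn
  set car := pvCarenteA atr cont n with hcar
  have hcarlen : car.length = n := pvCarenteA_len atr cont n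
  have hcarT : ∀ v, car.getD v false = true → v < n ∧ pvCarCond atr cont v = true := by
    intro v hv
    rw [hcar, pvCarenteA_getD] at hv
    simp only [Bool.and_eq_true, decide_eq_true_eq] at hv
    exact hv
  have hrow : ∀ u, car.getD u false = true → ∀ w ∈ g.getD u [], 0 ≤ w := by
    intro u hu w hw
    obtain ⟨hun, huc⟩ := hcarT u hu
    exact (hedge u hun huc w hw).1
  have hsym : Symmetric (pvE g car) := by
    rintro u w ⟨hcu, hcw, hm⟩
    obtain ⟨hun, huc⟩ := hcarT u hcu
    obtain ⟨hwn, hwc⟩ := hcarT w hcw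
    have hmem := hedge u hun huc (w : Int) hm
    have := hmem.2.2 (by rwa [Int.toNat_natCast])
    rw [Int.toNat_natCast] at this
    exact ⟨hcw, hcu, this⟩
  -- A side
  obtain ⟨-, -, hA⟩ := pvOuterA g car (by rw [hcarlen]) hrow n (le_refl _)
  -- B side
  have hgood := pvUnionAll_good g car (by rw [hcarlen]) hrow n (le_refl _)
  have hgood' : pvGood n ((List.range n).foldl (fun p v =>
      if car.getD v false then (g.getD v []).foldl (fun p w => pvUnionStep car p v w) p else p)
      (List.range n)) (pvE g car) := by
    refine pvGood_congr ?_ hgood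
    intro x y
    constructor
    · rintro ⟨-, hE⟩
      exact hE
    · intro hE
      exact ⟨by have := hcarT x hE.1; omega, hE⟩
  set pF := (List.range n).foldl (fun p v =>
      if car.getD v false then (g.getD v []).foldl (fun p w => pvUnionStep car p v w) p else p)
      (List.range n) with hpF
  have hB := pvFoldCount (fun v => car.getD v false && (pvFind pF (pF.length + 1) v == v)) n 0
  rw [hB]
  have hcnt : pvCnt (fun v => (car.getD v false && (pvFind pF (pF.length + 1) v == v)) = true) n =
      pvCnt (pvStart g car) n := by
    apply pvCnt_congr
    intro v hv
    by_cases hcv : car.getD v false = true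
    · have hfind : pvFind pF (pF.length + 1) v = pvRoot pF v := by
        apply pvFind_eq_root pF hgood'.2.1
        have := hgood'.1
        omega
      rw [hcv, hfind]
      simp only [Bool.true_and, beq_iff_eq]
      rw [show (pvRoot pF v = v ↔ ∀ y, Relation.EqvGen (pvE g car) v y → v ≤ y) from
        pvRoot_self_iff n pF (pvE g car) hgood' v]
      exact (pvStart_iff_min g car hsym v hcv).symm
    · have hcv' : car.getD v false = false := by
        revert hcv; cases car.getD v false <;> simp
      rw [hcv']
      simp only [Bool.false_and]
      constructor
      · intro h; simp at h
      · rintro ⟨h, -⟩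
        rw [hcv'] at h
        simp at h
  rw [hcnt, hA]
  simp

-- ===== VERDICT (by name: the statement is the Claim_ definition above) =====
theorem heuristica_v2_spec : Claim_equal_heuristica_v2 := by
  intro atribuicoes grafo contador_vizinhos _ hpre
  exact heuristica_v2_agree atribuicoes grafo contador_vizinhos hpre
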